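-- pv_equiv track=rewrite | github.com/sfc-gh-nmushtak/solve-modulo-inequality | solve.py | from_continued_fraction_to_fraction
-- ===== SOURCE A (Python) =====
-- def from_continued_fraction_to_fraction(cf):
--     first_term = cf[0]
--     # If the continued fraction has one term, then just return that term over 1:
--     if len(cf) == 1:
--         return first_term, 1
--
--     r_numer, r_denom = from_continued_fraction_to_fraction(cf[1:])
--     # numer/denom = first_term + 1/(r_numer/r_denom)
--     #             = first_term + r_denom/r_numer
--     #             = (r_numer*first_term + r_denom)/r_numer
--     numer = r_numer * first_term + r_denom
--     denom = r_numer
--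
--     # We don't need to reduce numer/denom: We can show gcd(numer, denom) = 1 by induction
--     # If len(cf) == 1, then gcd(first_term, 1) == 1
--     # Otherwise, gcd(numer, denom) = gcd(r_numer * first_term + r_denom, r_numer) = gcd(r_numer, r_denom) = 1 by induction hypothesis
--
--     return numer, denom
-- ===== SOURCE B (Python) =====
-- def from_continued_fraction_to_fraction(cf):
--     numer, denom = cf[-1], 1
--     for term in reversed(cf[:-1]):
--         numer, denom = term * numer + denom, numer
--     return numer, denom
-- ===== Notes on version B (the rewrite author's own statement) =====
-- stated objective: faster
-- what changed: Replaces A's recursion with repeated list slicing (each cf[1:] copies the suffix) by a single backward iterative pass accumulating numerator/denominator, no slicing and no recursion.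
import Mathlib
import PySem

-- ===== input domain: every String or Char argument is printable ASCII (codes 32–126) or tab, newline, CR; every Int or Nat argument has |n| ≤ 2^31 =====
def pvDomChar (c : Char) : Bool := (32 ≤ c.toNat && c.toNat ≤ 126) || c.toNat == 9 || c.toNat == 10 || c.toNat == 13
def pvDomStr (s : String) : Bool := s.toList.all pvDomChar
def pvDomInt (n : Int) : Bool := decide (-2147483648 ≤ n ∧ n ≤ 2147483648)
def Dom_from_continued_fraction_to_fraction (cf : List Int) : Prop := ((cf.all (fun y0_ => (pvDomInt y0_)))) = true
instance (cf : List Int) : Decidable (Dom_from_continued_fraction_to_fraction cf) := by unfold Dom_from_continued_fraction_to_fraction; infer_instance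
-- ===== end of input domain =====

-- B replaces A's recursion-with-slicing (O(n^2) copying) by one backward iterative pass (O(n)); equivalence proved for every nonempty list.


-- ===== PORT A =====
-- A: first_term = cf[0]; if len == 1 return (first_term, 1); else recurse on cf[1:]
-- and return (r_numer * first_term + r_denom, r_numer). Raises IndexError on [] (excluded by Pre_);
-- the [] branch value here is arbitrary.
def from_continued_fraction_to_fraction : List Int → Int × Int
  | [] => (0, 1)
  | [a] => (a, 1)
  | a :: rest =>
      let r := from_continued_fraction_to_fraction rest
      (r.1 * a + r.2, r.1)

-- ===== PORT B =====
-- B: numer, denom = cf[-1], 1; for term in reversed(cf[:-1]): numer, denom = term*numer+denom, numer.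
-- cf.reverse = cf[-1] :: reversed(cf[:-1]), so we match on the reversed list; [] raises in Python (excluded by Pre_).
def from_continued_fraction_to_fraction_alt (cf : List Int) : Int × Int :=
  match cf.reverse with
  | [] => (0, 1)
  | last :: rest =>
      rest.foldl (fun (acc : Int × Int) term => (term * acc.1 + acc.2, acc.1)) (last, 1)

-- ===== PRECONDITION & SPEC =====
-- Pre_ excludes exactly the empty list, on which A (cf[0]) raises IndexError.
def Pre_from_continued_fraction_to_fraction (cf : List Int) : Prop := cf ≠ []
instance (cf : List Int) : Decidable (Pre_from_continued_fraction_to_fraction cf) := by unfold Pre_from_continued_fraction_to_fraction; infer_instance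
def pvWitness_from_continued_fraction_to_fraction : List Int := [3, 7, 15]

def Spec_from_continued_fraction_to_fraction (cf : List Int) (out : Int × Int) : Prop := out = from_continued_fraction_to_fraction_alt cf
instance (cf : List Int) (out : Int × Int) : Decidable (Spec_from_continued_fraction_to_fraction cf out) := by unfold Spec_from_continued_fraction_to_fraction; infer_instance

-- ===== CLAIM (what is proved, stated in full; the proofs are below) =====
def Claim_equal_from_continued_fraction_to_fraction : Prop := ∀ (cf : List Int), Dom_from_continued_fraction_to_fraction cf → Pre_from_continued_fraction_to_fraction cf → Spec_from_continued_fraction_to_fraction cf (from_continued_fraction_to_fraction cf)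

-- ===== LEMMAS AND PROOFS =====

-- Unfolding B one step: prepending a term to a nonempty list applies one accumulator step.
theorem alt_cons (a : Int) (cf : List Int) (h : cf ≠ []) :
    from_continued_fraction_to_fraction_alt (a :: cf) =
      ((from_continued_fraction_to_fraction_alt cf).1 * a + (from_continued_fraction_to_fraction_alt cf).2,
       (from_continued_fraction_to_fraction_alt cf).1) := by
  obtain ⟨l, r, hr⟩ : ∃ l r, cf.reverse = l :: r := by
    cases hcr : cf.reverse with
    | nil => exact absurd (List.reverse_eq_nil_iff.mp hcr) h
    | cons l r => exact ⟨l, r, rfl⟩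
  simp only [from_continued_fraction_to_fraction_alt, List.reverse_cons, hr,
    List.cons_append, List.foldl_append, List.foldl_cons, List.foldl_nil]
  ring_nf

theorem a_eq_alt (cf : List Int) (h : cf ≠ []) :
    from_continued_fraction_to_fraction cf = from_continued_fraction_to_fraction_alt cf := by
  induction cf with
  | nil => exact absurd rfl h
  | cons a rest ih =>
    cases rest with
    | nil => simp [from_continued_fraction_to_fraction, from_continued_fraction_to_fraction_alt]
    | cons b rs =>
      rw [alt_cons a (b :: rs) (by simp), ← ih (by simp)]
      simp [from_continued_fraction_to_fraction]

-- ===== VERDICT (by name: the statement is the Claim_ definition above) =====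
theorem from_continued_fraction_to_fraction_spec : Claim_equal_from_continued_fraction_to_fraction := by
  intro cf _ hpre
  exact a_eq_alt cf hpre
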